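-- pv_equiv track=rewrite | github.com/lordofkillz/ultralytics-darkent-trainer | killz3.0.py | extract_activation_layers
-- ===== SOURCE A (Python) =====
-- def extract_activation_layers(cfg_lines):
--     activation_layers = []
--     in_convolutional_section = False
--
--     for line in cfg_lines:
--         line = line.strip()
--
--         if line == "[convolutional]":
--             in_convolutional_section = True
--         elif line.startswith("["):
--             in_convolutional_section = False
--
--         if in_convolutional_section and line.startswith("activation="):
--             activation_layers.append(line.split("=")[1].strip())
--
--     return ','.join(activation_layers)
-- ===== SOURCE B (Python) =====
-- def extract_activation_layers(cfg_lines):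
--     # Pass 1: group stripped lines into (header, body) sections; lines before the first header are dropped.
--     sections = []
--     for line in cfg_lines:
--         s = line.strip()
--         if s.startswith("["):
--             sections.append((s, []))
--         elif sections:
--             sections[-1][1].append(s)
--     # Pass 2: collect activation values from [convolutional] sections.
--     result = []
--     for header, body in sections:
--         if header == "[convolutional]":
--             for s in body:
--                 if s.startswith("activation="):
--                     result.append(s.split("=")[1].strip())
--     return ','.join(result)
-- ===== Notes on version B (the rewrite author's own statement) =====
-- stated objective: alternative
-- what changed: Replaces the single pass with an in-section boolean flag by a two-phase structure: first group the stripped lines into explicit (header, body) sections, then extract activation values from the [convolutional] sections.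
import Mathlib
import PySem

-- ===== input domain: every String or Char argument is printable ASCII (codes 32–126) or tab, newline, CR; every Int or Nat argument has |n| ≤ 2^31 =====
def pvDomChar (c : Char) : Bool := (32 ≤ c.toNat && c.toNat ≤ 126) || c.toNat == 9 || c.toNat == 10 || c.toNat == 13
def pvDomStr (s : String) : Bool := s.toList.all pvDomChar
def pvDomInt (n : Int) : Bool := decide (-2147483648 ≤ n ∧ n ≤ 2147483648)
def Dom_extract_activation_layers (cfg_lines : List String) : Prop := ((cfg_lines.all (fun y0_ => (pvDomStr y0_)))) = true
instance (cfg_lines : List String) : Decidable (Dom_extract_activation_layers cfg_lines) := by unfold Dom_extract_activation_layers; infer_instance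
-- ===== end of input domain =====

-- B replaces A's single pass with a boolean flag by a two-phase build-sections-then-extract decomposition; same O(n) cost, return values proved equal.


-- ===== PORT A =====
-- A's loop body: strip the line, update the in-[convolutional] flag, append the
-- activation value when inside a convolutional section.
-- line.split("=")[1] is guarded by startswith "activation=", so index 1 always
-- exists; `.getD 1 ""` is exact there.
def pvStepA (st : List String × Bool) (line : String) : List String × Bool :=
  let s := PySem.Str.strip line
  let flag := if s = "[convolutional]" then true
    else if PySem.Str.startswith s "[" then false
    else st.2
  if flag && PySem.Str.startswith s "activation=" then
    (st.1 ++ [PySem.Str.strip (((PySem.Str.split? s "=").getD []).getD 1 "")], flag)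
  else (st.1, flag)

def extract_activation_layers (cfg_lines : List String) : String :=
  PySem.Str.join "," (cfg_lines.foldl pvStepA ([], false)).1

-- ===== PORT B =====
-- Pass 1 step: a header line opens a new section; other lines are appended to the
-- current section's body (Python's sections.append / sections[-1][1].append is
-- encoded as cons onto a reversed section list, reversed once at the end).
def pvAddLine (secs : List (String × List String)) (line : String) : List (String × List String) :=
  let s := PySem.Str.strip line
  if PySem.Str.startswith s "[" then (s, []) :: secs
  else match secs with
    | [] => []
    | (h, b) :: t => (h, b ++ [s]) :: t

-- Pass 2, per section: the activation values of a [convolutional] section's body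
-- (the inner for/if/append loop; split("=")[1] guarded as in A).
def pvActs (sec : String × List String) : List String :=
  if sec.1 = "[convolutional]" then
    (sec.2.filter (fun s => PySem.Str.startswith s "activation=")).map
      (fun s => PySem.Str.strip (((PySem.Str.split? s "=").getD []).getD 1 ""))
  else []

def extract_activation_layers_alt (cfg_lines : List String) : String :=
  let sections := (cfg_lines.foldl pvAddLine []).reverse
  PySem.Str.join "," (sections.flatMap pvActs)

-- ===== PRECONDITION & SPEC =====
def Spec_extract_activation_layers (cfg_lines : List String) (out : String) : Prop := out = extract_activation_layers_alt cfg_lines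
instance (cfg_lines : List String) (out : String) : Decidable (Spec_extract_activation_layers cfg_lines out) := by unfold Spec_extract_activation_layers; infer_instance

-- ===== CLAIM (what is proved, stated in full; the proofs are below) =====
def Claim_equal_extract_activation_layers : Prop := ∀ (cfg_lines : List String), Dom_extract_activation_layers cfg_lines → Spec_extract_activation_layers cfg_lines (extract_activation_layers cfg_lines)

-- ===== LEMMAS AND PROOFS =====

-- A's flag equals "the current section (head of the reversed section list) is [convolutional]".
def pvFlag : List (String × List String) → Bool
  | [] => false
  | (h, _) :: _ => h = "[convolutional]"

lemma pvActs_nil (h : String) : pvActs (h, []) = [] := by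
  simp [pvActs]

lemma pvActs_snoc (h : String) (b : List String) (s : String) :
    pvActs (h, b ++ [s]) =
      pvActs (h, b) ++
        (if (decide (h = "[convolutional]") && PySem.Str.startswith s "activation=") = true
          then [PySem.Str.strip (((PySem.Str.split? s "=").getD []).getD 1 "")] else []) := by
  by_cases hc : h = "[convolutional]" <;>
    by_cases ha : PySem.Chars.startswith s.toList ['a','c','t','i','v','a','t','i','o','n','='] = true <;>
      simp [pvActs, hc, ha, List.filter_append] <;> simp at ha <;> simp [ha]

-- a stripped line cannot start with both "[" and "activation="
lemma pv_not_both (cs : List Char)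
    (h1 : PySem.Chars.startswith cs ['['] = true)
    (h2 : PySem.Chars.startswith cs ['a','c','t','i','v','a','t','i','o','n','='] = true) : False := by
  rw [PySem.Chars.startswith_iff] at h1 h2
  rcases h1 with ⟨t1, ht1⟩
  rcases h2 with ⟨t2, ht2⟩
  rw [← ht2] at ht1
  simp at ht1

-- Main invariant: running A's loop from the state extracted from `secs`
-- yields the extraction of B's pass-1 result.
lemma pv_main (lines : List String) :
    ∀ secs : List (String × List String),
    (lines.foldl pvStepA ((secs.reverse.flatMap pvActs), pvFlag secs)).1
      = (lines.foldl pvAddLine secs).reverse.flatMap pvActs := by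
  induction lines with
  | nil => intro secs; simp
  | cons l rest ih =>
    intro secs
    simp only [List.foldl_cons]
    cases hb : PySem.Chars.startswith (PySem.Chars.strip l.toList) ['['] with
    | true =>
      -- header line: opens a new section, A's flag becomes (s = "[convolutional]")
      have hna : PySem.Chars.startswith (PySem.Chars.strip l.toList) ['a','c','t','i','v','a','t','i','o','n','='] = false := by
        cases hx : PySem.Chars.startswith (PySem.Chars.strip l.toList) ['a','c','t','i','v','a','t','i','o','n','='] with
        | false => rfl
        | true => exact absurd (pv_not_both _ hb hx) (fun h => h)
      have hA : pvStepA ((secs.reverse.flatMap pvActs), pvFlag secs) l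
          = ((secs.reverse.flatMap pvActs), pvFlag (((PySem.Str.strip l), ([] : List String)) :: secs)) := by
        by_cases hc : PySem.Str.strip l = "[convolutional]" <;>
          simp [pvStepA, pvFlag, hc, hb, hna] <;> try decide
      have hB : pvAddLine secs l = ((PySem.Str.strip l), ([] : List String)) :: secs := by
        simp [pvAddLine, hb]
      rw [hA, hB]
      have := ih ((((PySem.Str.strip l), ([] : List String))) :: secs)
      simpa [pvActs_nil] using this
    | false =>
      -- non-header line
      have hnc : ¬ (PySem.Str.strip l = "[convolutional]") := by
        intro hc
        have hcs : PySem.Chars.strip l.toList = "[convolutional]".toList := by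
          have := congrArg String.toList hc
          simpa using this
        rw [hcs] at hb
        have hT : PySem.Chars.startswith "[convolutional]".toList ['['] = true := by decide
        rw [hT] at hb
        exact Bool.noConfusion hb
      cases secs with
      | nil =>
        have hA : pvStepA (([] : List (String × List String)).reverse.flatMap pvActs, pvFlag []) l
            = (([] : List (String × List String)).reverse.flatMap pvActs, pvFlag ([] : List (String × List String))) := by
          simp [pvStepA, pvFlag, hnc, hb]
        have hB : pvAddLine [] l = [] := by simp [pvAddLine, hb]
        rw [hA, hB]; exact ih []
      | cons hd tl =>
        obtain ⟨h, b⟩ := hd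
        have hB : pvAddLine ((h, b) :: tl) l = (h, b ++ [PySem.Str.strip l]) :: tl := by
          simp [pvAddLine, hb]
        have hflag : pvFlag ((h, b ++ [PySem.Str.strip l]) :: tl) = pvFlag ((h, b) :: tl) := by
          simp [pvFlag]
        have hA : pvStepA ((((h, b) :: tl).reverse.flatMap pvActs), pvFlag ((h, b) :: tl)) l
            = ((((h, b ++ [PySem.Str.strip l]) :: tl).reverse.flatMap pvActs),
               pvFlag ((h, b ++ [PySem.Str.strip l]) :: tl)) := by
          rw [hflag]
          cases ha : PySem.Chars.startswith (PySem.Chars.strip l.toList) ['a','c','t','i','v','a','t','i','o','n','='] <;>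
            by_cases hc : h = "[convolutional]" <;>
              simp [pvStepA, pvFlag, hnc, hb, ha, hc, pvActs_snoc]
        rw [hA, hB]
        exact ih ((h, b ++ [PySem.Str.strip l]) :: tl)

-- ===== VERDICT (by name: the statement is the Claim_ definition above) =====
theorem extract_activation_layers_spec : Claim_equal_extract_activation_layers := by
  intro cfg_lines _
  unfold Spec_extract_activation_layers extract_activation_layers extract_activation_layers_alt
  have := pv_main cfg_lines []
  simpa [pvFlag] using this.symm ▸ rfl
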